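-- pv_equiv track=rewrite | github.com/DaKoala/FindWord | decode.py | trim_word
-- ===== SOURCE A (Python) =====
-- def trim_word(s):
--     low = 0
--     high = len(s) - 1
--     while not s[low].isalpha():
--         low += 1
--     while not s[high].isalpha():
--         high -= 1
--     return s[low:high + 1]
-- ===== SOURCE B (Python) =====
-- def trim_word(s):
--     idx = [i for i, c in enumerate(s) if c.isalpha()]
--     return s[idx[0]:idx[-1] + 1]
-- ===== Notes on version B (the rewrite author's own statement) =====
-- stated objective: simpler
-- what changed: Replaces the two index-walking while loops with one forward pass collecting all alphabetic indices, then slices from the first to the last collected index.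
import Mathlib
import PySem

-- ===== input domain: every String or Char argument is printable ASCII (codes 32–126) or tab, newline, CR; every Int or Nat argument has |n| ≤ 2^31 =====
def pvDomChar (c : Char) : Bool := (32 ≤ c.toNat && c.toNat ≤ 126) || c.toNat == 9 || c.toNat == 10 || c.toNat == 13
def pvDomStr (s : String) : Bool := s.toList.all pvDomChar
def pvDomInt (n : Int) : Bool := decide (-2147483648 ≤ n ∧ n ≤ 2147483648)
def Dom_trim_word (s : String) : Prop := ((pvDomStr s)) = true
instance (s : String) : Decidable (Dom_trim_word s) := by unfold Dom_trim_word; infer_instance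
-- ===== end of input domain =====

-- B replaces A's two index-walking while loops by one forward pass collecting the
-- alphabetic indices, then slices from the first to the last one (objective: simpler).

-- ===== PORT A =====
-- 'while not s[low].isalpha(): low += 1'  (under Pre_ the loop stops inside the string;
-- if it would run past the end Python raises IndexError — excluded by Pre_)
def trimLowLoop (cs : List Char) (low : Nat) : Nat :=
  if h : low < cs.length then
    if PySem.Chars.isalpha cs[low] then low else trimLowLoop cs (low + 1)
  else low
termination_by cs.length - low

-- 'while not s[high].isalpha(): high -= 1'  (under Pre_ it stops at index ≥ 0;
-- the negative-index continuation is unreachable there and excluded by Pre_)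
def trimHighLoop (cs : List Char) (high : Nat) : Nat :=
  if h : high < cs.length then
    if PySem.Chars.isalpha cs[high] then high
    else match high with
      | 0 => 0
      | h + 1 => trimHighLoop cs h
  else high

def trim_word (s : String) : String :=
  let cs := s.toList
  let low := trimLowLoop cs 0
  let high := trimHighLoop cs (cs.length - 1)
  String.ofList (PySem.List.slice cs (some (low : Int)) (some ((high : Int) + 1)))

-- ===== PORT B =====
def trim_word_alt (s : String) : String :=
  let cs := s.toList
  let idx : List Int :=
    (PySem.List.enumerate cs 0).foldl
      (fun acc p => if PySem.Chars.isalpha p.2 then acc ++ [p.1] else acc) []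
  match PySem.List.pyGet? idx 0, PySem.List.pyGet? idx (-1) with
  | some a, some b => String.ofList (PySem.List.slice cs (some a) (some (b + 1)))
  | _, _ => ""   -- Python raises IndexError here; excluded by Pre_

-- ===== PRECONDITION & SPEC =====
-- Pre_ excludes exactly the inputs with no alphabetic character (including the empty
-- string), on which A raises IndexError (and B does too).
def Pre_trim_word (s : String) : Prop := s.toList.any PySem.Chars.isalpha = true
instance (s : String) : Decidable (Pre_trim_word s) := by unfold Pre_trim_word; infer_instance

def pvWitness_trim_word : String := " ab. "

def Spec_trim_word (s : String) (out : String) : Prop := out = trim_word_alt s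
instance (s : String) (out : String) : Decidable (Spec_trim_word s out) := by unfold Spec_trim_word; infer_instance

-- ===== CLAIM (what is proved, stated in full; the proofs are below) =====
def Claim_equal_trim_word : Prop := ∀ (s : String), Dom_trim_word s → Pre_trim_word s → Spec_trim_word s (trim_word s)


-- ===== LEMMAS AND PROOFS =====

-- abbreviation used only by the proofs: the alphabetic indices of cs, numbered from s
def alphaIdx (cs : List Char) (s : Int) : List Int :=
  ((PySem.List.enumerate cs s).filter (fun p => PySem.Chars.isalpha p.2)).map (·.1)

theorem alphaIdx_cons (c : Char) (t : List Char) (s : Int) :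
    alphaIdx (c :: t) s =
      if PySem.Chars.isalpha c then s :: alphaIdx t (s + 1) else alphaIdx t (s + 1) := by
  simp [alphaIdx, PySem.List.enumerate_cons, List.filter]
  split <;> simp_all

theorem alphaIdx_eq_nil (cs : List Char) (s : Int)
    (h : cs.any PySem.Chars.isalpha = false) : alphaIdx cs s = [] := by
  induction cs generalizing s with
  | nil => rfl
  | cons c t ih =>
    simp only [List.any_cons, Bool.or_eq_false_iff] at h
    rw [alphaIdx_cons, if_neg (by simp [h.1]), ih (s + 1) h.2]

theorem getLast?_cons_ne (a : Int) (l : List Int) (h : l ≠ []) :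
    (a :: l).getLast? = l.getLast? := by
  cases l with
  | nil => exact absurd rfl h
  | cons b t => simp

theorem trimLowLoop_shift (c : Char) (t : List Char) (low : Nat) :
    trimLowLoop (c :: t) (low + 1) = trimLowLoop t low + 1 := by
  fun_induction trimLowLoop t low with
  | case1 low h hp =>
    rw [trimLowLoop, dif_pos (by simpa using Nat.succ_lt_succ h),
        List.getElem_cons_succ, if_pos hp]
  | case2 low h hp ih =>
    rw [trimLowLoop, dif_pos (by simpa using Nat.succ_lt_succ h),
        List.getElem_cons_succ, if_neg hp, ih]
  | case3 low h =>
    have hA : trimLowLoop (c :: t) (low + 1) = low + 1 := by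
      rw [trimLowLoop, dif_neg (by simp only [List.length_cons]; omega)]
    simp [hA]

theorem trimLowLoop_cons_zero (c : Char) (t : List Char) (hc : ¬ PySem.Chars.isalpha c) :
    trimLowLoop (c :: t) 0 = trimLowLoop t 0 + 1 := by
  rw [trimLowLoop, dif_pos (by simp), List.getElem_cons_zero, if_neg (by simpa using hc)]
  exact trimLowLoop_shift c t 0

theorem alphaIdx_head (cs : List Char) (s : Int)
    (h : cs.any PySem.Chars.isalpha = true) :
    (alphaIdx cs s).head? = some (s + (trimLowLoop cs 0 : Nat)) := by
  induction cs generalizing s with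
  | nil => simp at h
  | cons c t ih =>
    rw [alphaIdx_cons]
    by_cases hc : PySem.Chars.isalpha c
    · rw [if_pos hc, trimLowLoop, dif_pos (by simp), List.getElem_cons_zero, if_pos hc]
      simp
    · have ht : t.any PySem.Chars.isalpha = true := by
        simp only [List.any_cons, hc] at h; simpa using h
      rw [if_neg hc, ih (s + 1) ht, trimLowLoop_cons_zero c t hc]
      push_cast; ring_nf

theorem trimHighLoop_shift (c : Char) (t : List Char) (h : Nat)
    (hex : ∃ j, j ≤ h ∧ ∃ hj : j < t.length, PySem.Chars.isalpha t[j]) :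
    trimHighLoop (c :: t) (h + 1) = trimHighLoop t h + 1 := by
  induction h with
  | zero =>
    obtain ⟨j, hj, hjl, hp⟩ := hex
    interval_cases j
    rw [trimHighLoop, dif_pos (by simpa using Nat.succ_lt_succ hjl),
        List.getElem_cons_succ, if_pos hp,
        trimHighLoop, dif_pos hjl, if_pos hp]
  | succ k ih =>
    by_cases hl : k + 1 < t.length
    · by_cases hp : PySem.Chars.isalpha t[k + 1]
      · rw [trimHighLoop, dif_pos (by simpa using Nat.succ_lt_succ hl),
            List.getElem_cons_succ, if_pos hp]
        conv_rhs => rw [trimHighLoop]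
        rw [dif_pos hl, if_pos hp]
      · rw [trimHighLoop, dif_pos (by simpa using Nat.succ_lt_succ hl),
            List.getElem_cons_succ, if_neg hp]
        conv_rhs => rw [trimHighLoop]
        rw [dif_pos hl, if_neg hp]
        apply ih
        obtain ⟨j, hj, hjl, hpj⟩ := hex
        refine ⟨j, ?_, hjl, hpj⟩
        have : j ≠ k + 1 := by
          intro he; subst he; exact absurd hpj (by simpa using hp)
        omega
    · have hA : trimHighLoop (c :: t) (k + 1 + 1) = k + 1 + 1 := by
        rw [trimHighLoop, dif_neg (by simp only [List.length_cons]; omega)]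
      have hB : trimHighLoop t (k + 1) = k + 1 := by
        rw [trimHighLoop, dif_neg hl]
      simp [hA, hB]

theorem trimHighLoop_first (c : Char) (t : List Char)
    (hc : PySem.Chars.isalpha c) (ht : t.any PySem.Chars.isalpha = false)
    (h : Nat) (hh : h ≤ t.length) :
    trimHighLoop (c :: t) h = 0 := by
  induction h with
  | zero =>
    rw [trimHighLoop, dif_pos (by simp), List.getElem_cons_zero, if_pos hc]
  | succ k ih =>
    have hl : k < t.length := by omega
    have hp : PySem.Chars.isalpha t[k] = false := by
      simpa using List.any_eq_false.mp ht t[k] (List.getElem_mem hl)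
    rw [trimHighLoop, dif_pos (by simpa using Nat.succ_lt_succ hl),
        List.getElem_cons_succ, if_neg (by simp [hp])]
    exact ih (by omega)

theorem any_to_exists {t : List Char} (ht : t.any PySem.Chars.isalpha = true) :
    ∃ j, j ≤ t.length - 1 ∧ ∃ hj : j < t.length, PySem.Chars.isalpha t[j] := by
  obtain ⟨x, hx, hpx⟩ := List.any_eq_true.mp ht
  obtain ⟨j, hjl, he⟩ := List.getElem_of_mem hx
  exact ⟨j, by omega, hjl, by rw [he]; exact hpx⟩

theorem alphaIdx_last (cs : List Char) (s : Int)
    (h : cs.any PySem.Chars.isalpha = true) :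
    (alphaIdx cs s).getLast? = some (s + (trimHighLoop cs (cs.length - 1) : Nat)) := by
  induction cs generalizing s with
  | nil => simp at h
  | cons c t ih =>
    rw [alphaIdx_cons]
    by_cases ht : t.any PySem.Chars.isalpha
    · have hne : alphaIdx t (s + 1) ≠ [] := by
        intro he
        have := alphaIdx_head t (s + 1) ht
        rw [he] at this; simp at this
      have htl : 0 < t.length := by
        cases t with
        | nil => simp at ht
        | cons _ _ => simp
      have hlen : (c :: t).length - 1 = t.length - 1 + 1 := by
        simp only [List.length_cons]; omega
      have hshift : trimHighLoop (c :: t) (t.length - 1 + 1) = trimHighLoop t (t.length - 1) + 1 :=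
        trimHighLoop_shift c t (t.length - 1) (any_to_exists ht)
      rw [hlen, hshift]
      by_cases hc : PySem.Chars.isalpha c
      · rw [if_pos hc, getLast?_cons_ne s _ hne, ih (s + 1) ht]
        push_cast; ring_nf
      · rw [if_neg hc, ih (s + 1) ht]
        push_cast; ring_nf
    · have hf : t.any PySem.Chars.isalpha = false := by simpa using ht
      have hc : PySem.Chars.isalpha c := by
        simp only [List.any_cons, hf, Bool.or_false] at h; exact h
      rw [if_pos hc, alphaIdx_eq_nil t (s + 1) hf]
      rw [show (c :: t).length - 1 = t.length from by simp,
          trimHighLoop_first c t hc hf t.length le_rfl]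
      simp

theorem foldl_idx (cs : List Char) :
    (PySem.List.enumerate cs 0).foldl
      (fun acc p => if PySem.Chars.isalpha p.2 then acc ++ [p.1] else acc)
      ([] : List Int) = alphaIdx cs 0 := by
  exact (PySem.List.foldl_append_if (fun (p : Int × Char) => PySem.Chars.isalpha p.2)
    (fun p => p.1) _ []).trans (by simp [alphaIdx])

-- ===== VERDICT (by name: the statement is the Claim_ definition above) =====
theorem trim_word_spec : Claim_equal_trim_word := by
  intro s _ hpre
  have hany : s.toList.any PySem.Chars.isalpha = true := hpre
  have hhead := alphaIdx_head s.toList 0 hany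
  have hlast := alphaIdx_last s.toList 0 hany
  simp only [zero_add] at hhead hlast
  unfold Spec_trim_word trim_word trim_word_alt
  simp only [foldl_idx, PySem.List.pyGet?_zero, PySem.List.pyGet?_neg_one,
    ← List.head?_eq_getElem?, hhead, hlast]
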